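-- pv_equiv track=rewrite | github.com/yejunedev/coding_test | 프로그래머스/0/181926. 수 조작하기 1/수 조작하기 1.py | solution
-- ===== SOURCE A (Python) =====
-- def solution(n, control):
--     answer = n
--     for x in control:
--         if x == 'w':
--             answer+=1
--         elif x == 's':
--             answer-=1
--         elif x == 'd':
--             answer+=10
--         elif x == 'a':
--             answer-=10
--
--     return answer
-- ===== SOURCE B (Python) =====
-- from collections import Counter
--
-- def solution(n, control):
--     cnt = Counter(control)
--     return n + cnt['w'] - cnt['s'] + 10 * cnt['d'] - 10 * cnt['a']
-- ===== Notes on version B (the rewrite author's own statement) =====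
-- stated objective: alternative
-- what changed: Replaced the per-character branch-and-accumulate loop with a Counter tally of control followed by one closed-form arithmetic expression n + cnt['w'] - cnt['s'] + 10*cnt['d'] - 10*cnt['a'].
import Mathlib
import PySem

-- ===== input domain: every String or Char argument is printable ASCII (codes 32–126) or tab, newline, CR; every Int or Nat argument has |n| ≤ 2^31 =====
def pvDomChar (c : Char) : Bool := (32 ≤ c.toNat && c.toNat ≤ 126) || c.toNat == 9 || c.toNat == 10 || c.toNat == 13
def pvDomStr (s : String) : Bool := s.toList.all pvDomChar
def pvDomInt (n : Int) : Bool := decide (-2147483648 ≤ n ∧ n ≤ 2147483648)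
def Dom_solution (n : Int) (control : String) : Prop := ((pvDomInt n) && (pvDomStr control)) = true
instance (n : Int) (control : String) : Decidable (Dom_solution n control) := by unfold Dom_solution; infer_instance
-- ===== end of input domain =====

-- B replaces A's per-character branch-and-accumulate loop by a Counter tally and one closed-form expression (objective: alternative).

-- ===== PORT A =====
-- literal port of A: running accumulator over the characters of control
def solution (n : Int) (control : String) : Int :=
  control.toList.foldl (fun answer x =>
    if x == 'w' then answer + 1
    else if x == 's' then answer - 1
    else if x == 'd' then answer + 10
    else if x == 'a' then answer - 10
    else answer) n

-- ===== PORT B =====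
-- port of Source B: cnt = Counter(control); closed-form combination of the four counts
def solution_alt (n : Int) (control : String) : Int :=
  let cnt := PySem.Dict.counter control.toList
  n + cnt.getD 'w' 0 - cnt.getD 's' 0 + 10 * cnt.getD 'd' 0 - 10 * cnt.getD 'a' 0

-- ===== PRECONDITION & SPEC =====
def Spec_solution (n : Int) (control : String) (out : Int) : Prop := out = solution_alt n control
instance (n : Int) (control : String) (out : Int) : Decidable (Spec_solution n control out) := by unfold Spec_solution; infer_instance

-- ===== CLAIM (what is proved, stated in full; the proofs are below) =====
def Claim_equal_solution : Prop := ∀ (n : Int) (control : String), Dom_solution n control → Spec_solution n control (solution n control)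

-- ===== LEMMAS AND PROOFS =====
theorem solution_foldl_counts (l : List Char) (n : Int) :
    l.foldl (fun answer x =>
      if x == 'w' then answer + 1
      else if x == 's' then answer - 1
      else if x == 'd' then answer + 10
      else if x == 'a' then answer - 10
      else answer) n
    = n + (l.count 'w' : Int) - (l.count 's' : Int)
        + 10 * (l.count 'd' : Int) - 10 * (l.count 'a' : Int) := by
  induction l generalizing n with
  | nil => simp
  | cons c l ih =>
    simp only [List.foldl_cons, ih, List.count_cons]
    by_cases hw : c = 'w' <;> by_cases hs : c = 's' <;> by_cases hd : c = 'd' <;>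
      by_cases ha : c = 'a' <;> simp_all <;> ring

-- ===== VERDICT (by name: the statement is the Claim_ definition above) =====
theorem solution_spec : Claim_equal_solution := by
  intro n control _
  unfold Spec_solution solution solution_alt
  simp only [PySem.Dict.getD_counter]
  exact solution_foldl_counts _ _
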